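-- pv_equiv track=rewrite | github.com/zjl9959/EatBeanGame | assembler.py | parse_addr
-- ===== SOURCE A (Python) =====
-- def parse_addr(addr):
--     if addr < 0 or addr > 64:
--         raise Exception('错误：地址 {} 超出处理器支持的范围'.format(addr))
--     high, low = '', ''
--     for i in range(4):
--         low += str(addr % 2)
--         addr = addr // 2
--     for i in range(2):
--         high += str(addr % 2)
--         addr = addr // 2
--     return high, low
-- ===== SOURCE B (Python) =====
-- def parse_addr(addr):
--     if addr < 0 or addr > 64:
--         raise Exception('错误：地址 {} 超出处理器支持的范围'.format(addr))
--     s = format(addr % 64, '06b')[::-1]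
--     return s[4:6], s[0:4]
-- ===== Notes on version B (the rewrite author's own statement) =====
-- stated objective: idiomatic
-- what changed: Replaced the two peel-off division loops by one fixed-width binary formatting of the address, reversed to LSB-first and sliced into the low and high parts.
import Mathlib
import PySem

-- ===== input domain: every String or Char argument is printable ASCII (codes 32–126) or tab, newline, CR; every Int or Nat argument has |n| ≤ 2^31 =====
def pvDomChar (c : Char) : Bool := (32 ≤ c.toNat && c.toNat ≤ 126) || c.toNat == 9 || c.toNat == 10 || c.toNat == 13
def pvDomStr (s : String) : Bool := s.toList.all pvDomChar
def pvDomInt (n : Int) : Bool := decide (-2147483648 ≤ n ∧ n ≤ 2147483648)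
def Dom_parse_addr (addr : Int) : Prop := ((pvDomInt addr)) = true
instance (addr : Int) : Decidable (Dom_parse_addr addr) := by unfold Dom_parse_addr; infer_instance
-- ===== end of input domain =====

-- B replaces A's two peel-off division loops by one fixed-width binary
-- formatting, reversed to LSB-first and sliced (objective: idiomatic).


-- ===== PORT A =====
-- the two for-loops: each step appends str(addr % 2) and floor-divides addr by 2
def pvPeel (st : String × Int) : String × Int :=
  (st.1 ++ PySem.Int.toStr (PySem.Int.mod st.2 2), PySem.Int.floordiv st.2 2)

def parse_addr (addr : Int) : String × String :=
  let l := (List.range 4).foldl (fun st _ => pvPeel st) ("", addr)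
  let h := (List.range 2).foldl (fun st _ => pvPeel st) ("", l.2)
  (h.1, l.1)

-- ===== PORT B =====
-- format(n, '06b') for 0 ≤ n < 64: MSB-first 6-bit binary string (exact on that range)
def pvFmt06b (n : Int) : List Char :=
  (List.range 6).map (fun i => if PySem.Int.mod (PySem.Int.floordiv n (2 ^ (5 - i))) 2 = 1 then '1' else '0')

def parse_addr_alt (addr : Int) : String × String :=
  let s := (pvFmt06b (PySem.Int.mod addr 64)).reverse   -- [::-1]
  (String.ofList (PySem.List.slice s (some 4) (some 6)), String.ofList (PySem.List.slice s (some 0) (some 4)))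

-- ===== PRECONDITION & SPEC =====
-- Pre_: exactly the inputs where A returns (outside, A raises Exception)
def Pre_parse_addr (addr : Int) : Prop := 0 ≤ addr ∧ addr ≤ 64
instance (addr : Int) : Decidable (Pre_parse_addr addr) := by unfold Pre_parse_addr; infer_instance
def pvWitness_parse_addr : Int := (5)

def Spec_parse_addr (addr : Int) (out : String × String) : Prop := out = parse_addr_alt addr
instance (addr : Int) (out : String × String) : Decidable (Spec_parse_addr addr out) := by unfold Spec_parse_addr; infer_instance

-- ===== CLAIM (what is proved, stated in full; the proofs are below) =====
def Claim_equal_parse_addr : Prop := ∀ (addr : Int), Dom_parse_addr addr → Pre_parse_addr addr → Spec_parse_addr addr (parse_addr addr)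

-- ===== LEMMAS AND PROOFS =====

-- ===== VERDICT (by name: the statement is the Claim_ definition above) =====
theorem parse_addr_spec : Claim_equal_parse_addr := by
  intro addr _ hpre
  obtain ⟨h0, h1⟩ := hpre
  unfold Spec_parse_addr
  interval_cases addr <;> decide
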